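-- pv_equiv track=rewrite | github.com/prakruthishekar/Competitive-Coding | Cisco/Max difference bwt two elements.py | funcMaxDifference
-- ===== SOURCE A (Python) =====
-- def funcMaxDifference(inputArr):
-- 	# Write your code here
-- 	min_num = inputArr[0]
-- 	max_diff = 0
-- 	for i in range(1, len(inputArr)):
-- 		if(inputArr[i]< min_num):
-- 			min_num = inputArr[i]
-- 		elif inputArr[i] - min_num> max_diff:
-- 			max_diff = inputArr[i] - min_num
-- 	return max_diff
-- ===== SOURCE B (Python) =====
-- def funcMaxDifference(inputArr):
--     # two-pass decomposition: build a prefix-minimum table, then scan differences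
--     prefmin = [inputArr[0]]
--     for x in inputArr[1:]:
--         prefmin.append(min(prefmin[-1], x))
--     max_diff = 0
--     for x, m in zip(inputArr[1:], prefmin):
--         if x - m > max_diff:
--             max_diff = x - m
--     return max_diff
-- ===== Notes on version B (the rewrite author's own statement) =====
-- stated objective: alternative
-- what changed: replaces A's single fused scan carrying (min_num, max_diff) with a two-pass decomposition: one pass builds a prefix-minimum table, a second pass over the zipped tail/table takes the best difference
import Mathlib
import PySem

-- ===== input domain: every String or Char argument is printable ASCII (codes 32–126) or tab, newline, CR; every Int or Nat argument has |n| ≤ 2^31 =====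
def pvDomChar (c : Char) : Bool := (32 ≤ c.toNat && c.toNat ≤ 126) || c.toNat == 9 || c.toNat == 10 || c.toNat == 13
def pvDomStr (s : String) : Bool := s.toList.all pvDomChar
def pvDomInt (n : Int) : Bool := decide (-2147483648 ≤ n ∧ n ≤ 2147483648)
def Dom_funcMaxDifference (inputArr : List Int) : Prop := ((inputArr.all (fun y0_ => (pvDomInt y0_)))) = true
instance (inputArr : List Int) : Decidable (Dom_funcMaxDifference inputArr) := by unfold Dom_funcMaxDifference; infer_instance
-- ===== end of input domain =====

-- B changes A's fused scan into a two-pass prefix-minimum decomposition; return value only.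

-- ===== PORT A =====
-- A reads inputArr[0], then loops over the remaining elements updating (min_num, max_diff).
def funcMaxDifference (inputArr : List Int) : Int :=
  match inputArr with
  | [] => 0  -- inputArr[0] raises IndexError in Python; excluded by Pre_
  | x :: rest =>
    (rest.foldl (fun s a =>
      if a < s.1 then (a, s.2)
      else if a - s.1 > s.2 then (s.1, a - s.1)
      else s) (x, 0)).2

-- ===== PORT B =====
-- first pass: prefix-minimum table (built front-most-recent, then reversed);
-- second pass: fold over the zip of the tail with the table.
def funcMaxDifference_alt (inputArr : List Int) : Int :=
  match inputArr with
  | [] => 0  -- inputArr[0] raises IndexError in Python; excluded by Pre_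
  | x :: rest =>
    let prefmin := (rest.foldl (fun acc a => min acc.head! a :: acc) [x]).reverse
    (rest.zip prefmin).foldl (fun d p => if p.1 - p.2 > d then p.1 - p.2 else d) 0

-- ===== PRECONDITION & SPEC =====
-- Both Pythons raise IndexError on the empty list (inputArr[0]); Pre_ excludes exactly that.
def Pre_funcMaxDifference (inputArr : List Int) : Prop := inputArr ≠ []
instance (inputArr : List Int) : Decidable (Pre_funcMaxDifference inputArr) := by unfold Pre_funcMaxDifference; infer_instance
def pvWitness_funcMaxDifference : List Int := [3, -1, 4, 1, 5]

def Spec_funcMaxDifference (inputArr : List Int) (out : Int) : Prop := out = funcMaxDifference_alt inputArr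
instance (inputArr : List Int) (out : Int) : Decidable (Spec_funcMaxDifference inputArr out) := by unfold Spec_funcMaxDifference; infer_instance

-- ===== CLAIM (what is proved, stated in full; the proofs are below) =====
def Claim_equal_funcMaxDifference : Prop := ∀ (inputArr : List Int), Dom_funcMaxDifference inputArr → Pre_funcMaxDifference inputArr → Spec_funcMaxDifference inputArr (funcMaxDifference inputArr)

-- ===== LEMMAS AND PROOFS =====

-- recursive characterisation of the prefix-minimum table (without its leading element)
def pvPrefMins (m : Int) : List Int → List Int
  | [] => []
  | a :: t => min m a :: pvPrefMins (min m a) t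

lemma pvBuild (rest : List Int) : ∀ (h : Int) (t : List Int),
    (rest.foldl (fun acc a => min acc.head! a :: acc) (h :: t)).reverse
      = (h :: t).reverse ++ pvPrefMins h rest := by
  induction rest with
  | nil => intro h t; simp [pvPrefMins]
  | cons a r ih =>
      intro h t
      simp only [List.foldl, List.head!_cons, pvPrefMins]
      rw [ih (min h a) (h :: t)]
      simp

lemma pvScan (t : List Int) : ∀ (m d : Int), 0 ≤ d →
    (t.foldl (fun s a =>
      if a < s.1 then (a, s.2)
      else if a - s.1 > s.2 then (s.1, a - s.1)
      else s) (m, d)).2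
      = ((t.zip (m :: pvPrefMins m t)).foldl
          (fun d p => if p.1 - p.2 > d then p.1 - p.2 else d) d) := by
  induction t with
  | nil => intro m d _; simp
  | cons a r ih =>
      intro m d hd
      simp only [List.foldl, pvPrefMins, List.zip_cons_cons]
      have hstep : (if a < m then (a, d)
          else if a - m > d then (m, a - m) else (m, d)) = (min m a, max d (a - m)) := by
        split_ifs with h1 h2 <;>
          simp [Prod.ext_iff, min_def, max_def] <;> omega
      rw [hstep, ih (min m a) (max d (a - m)) (le_trans hd (le_max_left _ _))]
      congr 1
      · omega

lemma pvMain (x : Int) (rest : List Int) :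
    funcMaxDifference (x :: rest) = funcMaxDifference_alt (x :: rest) := by
  simp only [funcMaxDifference, funcMaxDifference_alt]
  rw [pvBuild rest x []]
  simpa using pvScan rest x 0 le_rfl

-- ===== VERDICT (by name: the statement is the Claim_ definition above) =====
theorem funcMaxDifference_spec : Claim_equal_funcMaxDifference := by
  intro inputArr _ hpre
  unfold Spec_funcMaxDifference
  cases inputArr with
  | nil => exact absurd rfl hpre
  | cons x rest => exact pvMain x rest
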